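-- pv_equiv track=rewrite | github.com/sergiorgiraldo/Python-lang | data-engineering-interview-patterns/spark/01_joins/shuffle_join.py | hash_partition_join
-- ===== SOURCE A (Python) =====
-- from collections import defaultdict
--
-- def hash_partition_join(
--     left: list[tuple[str, int]],
--     right: list[tuple[str, str]],
--     num_partitions: int = 4,
-- ) -> list[tuple[str, int, str]]:
--     """Simulate a shuffle join by hash-partitioning both sides.
--
--     Each side is bucketed by hash(key) % num_partitions, then matching
--     buckets are joined locally with a dict lookup.
--
--     Time:  O(n + m) amortized
--     Space: O(n + m) for the partitioned buckets
--
--     Args: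
--         left: List of (key, value) tuples.
--         right: List of (key, label) tuples.
--         num_partitions: Number of hash buckets.
--
--     Returns:
--         List of (key, value, label) tuples for matching keys.
--
--     Example:
--         >>> hash_partition_join([("a", 1)], [("a", "x")], 2)
--         [('a', 1, 'x')]
--     """
--     # Partition both sides by hash of key
--     left_buckets: dict[int, list[tuple[str, int]]] = defaultdict(list)
--     right_buckets: dict[int, list[tuple[str, str]]] = defaultdict(list)
--
--     for k, v in left:
--         left_buckets[hash(k) % num_partitions].append((k, v))
--     for k, v in right:
--         right_buckets[hash(k) % num_partitions].append((k, v))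
--
--     # Join within each partition
--     results: list[tuple[str, int, str]] = []
--     for partition_id in range(num_partitions):
--         right_lookup = defaultdict(list)
--         for k, v in right_buckets[partition_id]:
--             right_lookup[k].append(v)
--
--         for k, v in left_buckets[partition_id]:
--             for label in right_lookup[k]:
--                 results.append((k, v, label))
--
--     return results
-- ===== SOURCE B (Python) =====
-- def hash_partition_join(
--     left: list[tuple[str, int]],
--     right: list[tuple[str, str]],
--     num_partitions: int = 4,
-- ) -> list[tuple[str, int, str]]:
--     """Shuffle join via one global right-side lookup keyed by (partition, key),
--     then a single stable sort of the left rows by partition id and one pass."""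
--     lookup: dict[tuple[int, str], list[str]] = {}
--     for k, lab in right:
--         lookup.setdefault((hash(k) % num_partitions, k), []).append(lab)
--     tagged = [(hash(k) % num_partitions, k, v) for k, v in left]
--     tagged.sort(key=lambda t: t[0])  # stable: left order kept inside a partition
--     return [(k, v, lab) for pid, k, v in tagged for lab in lookup.get((pid, k), [])]
-- ===== Notes on version B (the rewrite author's own statement) =====
-- stated objective: alternative
-- what changed: Replaces the two per-side bucket dicts and the per-partition join loop with one global right lookup keyed by (partition, key) plus a single stable sort of the left rows by partition id, joined in one pass; Pre_ restricts to the natural domain num_partitions >= 1, excluding num_partitions == 0 (A raises ZeroDivisionError on nonempty input) and negative partition counts, where A's empty result is an artefact of its empty range(num_partitions) loop.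
-- outside the precondition, e.g. on hash_partition_join([('a', 1)], [('a', 'x')], -2): A returns [], B returns [('a', 1, 'x')]
import Mathlib
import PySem

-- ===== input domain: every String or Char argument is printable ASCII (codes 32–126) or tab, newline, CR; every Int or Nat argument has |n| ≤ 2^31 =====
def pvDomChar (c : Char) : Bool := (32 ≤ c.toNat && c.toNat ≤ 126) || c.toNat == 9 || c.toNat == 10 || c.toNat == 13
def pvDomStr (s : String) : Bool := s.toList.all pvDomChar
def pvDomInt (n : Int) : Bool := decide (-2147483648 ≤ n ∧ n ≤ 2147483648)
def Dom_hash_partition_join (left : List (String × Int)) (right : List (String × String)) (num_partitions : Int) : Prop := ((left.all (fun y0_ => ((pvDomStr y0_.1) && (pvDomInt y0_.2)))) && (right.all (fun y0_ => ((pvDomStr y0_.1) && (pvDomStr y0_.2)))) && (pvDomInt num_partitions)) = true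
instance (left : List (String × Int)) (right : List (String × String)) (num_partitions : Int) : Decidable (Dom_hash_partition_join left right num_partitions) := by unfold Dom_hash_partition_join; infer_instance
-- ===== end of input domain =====

-- B replaces A's two per-side bucket dicts and per-partition join loop by one
-- global (partition, key) lookup over `right` plus a single stable sort of
-- `left` by partition id (objective: alternative decomposition, same result on
-- the natural domain num_partitions ≥ 1).
-- Python's hash(str) is modelled by the deterministic pvHash below, shared by
-- both ports; the set of joined rows does not depend on the hash function.

-- ===== PORT A =====
-- deterministic model of Python's str hash (polynomial rolling hash)
def pvHash (s : String) : Int := s.toList.foldl (fun a c => a * 1000003 + (c.toNat : Int)) 0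

def hash_partition_join (left : List (String × Int)) (right : List (String × String)) (num_partitions : Int) : List (String × Int × String) :=
  let left_buckets := left.foldl
    (fun d kv => d.modify (PySem.Int.mod (pvHash kv.1) num_partitions) [] (fun b => b ++ [kv]))
    (PySem.Dict.empty : PySem.Dict Int (List (String × Int)))
  let right_buckets := right.foldl
    (fun d kv => d.modify (PySem.Int.mod (pvHash kv.1) num_partitions) [] (fun b => b ++ [kv]))
    (PySem.Dict.empty : PySem.Dict Int (List (String × String)))
  (PySem.List.pyRange 0 num_partitions).foldl
    (fun results pid =>
      let right_lookup := (right_buckets.getD pid []).foldl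
        (fun d kv => d.modify kv.1 [] (fun b => b ++ [kv.2]))
        (PySem.Dict.empty : PySem.Dict String (List String))
      (left_buckets.getD pid []).foldl
        (fun results kv =>
          (right_lookup.getD kv.1 []).foldl
            (fun results lab => results ++ [(kv.1, kv.2, lab)]) results)
        results)
    []

-- ===== PORT B =====
def hash_partition_join_alt (left : List (String × Int)) (right : List (String × String)) (num_partitions : Int) : List (String × Int × String) :=
  let lookup := right.foldl
    (fun d kl => d.modify (PySem.Int.mod (pvHash kl.1) num_partitions, kl.1) [] (fun b => b ++ [kl.2]))
    (PySem.Dict.empty : PySem.Dict (Int × String) (List String))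
  let tagged := left.map (fun kv => (PySem.Int.mod (pvHash kv.1) num_partitions, kv.1, kv.2))
  let sortedT := PySem.List.sorted tagged (fun t => t.1)
  sortedT.flatMap (fun t => (lookup.getD (t.1, t.2.1) []).map (fun lab => (t.2.1, t.2.2, lab)))

-- ===== PRECONDITION & SPEC =====
-- Pre_ restricts to the natural domain of a partition count, num_partitions ≥ 1:
-- at num_partitions == 0 A raises ZeroDivisionError on any nonempty side, and for
-- negative num_partitions A's empty result is an artefact of its empty
-- range(num_partitions) loop (a negative partition count is malformed input).
def Pre_hash_partition_join (left : List (String × Int)) (right : List (String × String)) (num_partitions : Int) : Prop :=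
  1 ≤ num_partitions
instance (left : List (String × Int)) (right : List (String × String)) (num_partitions : Int) : Decidable (Pre_hash_partition_join left right num_partitions) := by unfold Pre_hash_partition_join; infer_instance

def pvWitness_hash_partition_join : (List (String × Int)) × (List (String × String)) × Int := ([("a", 1)], [("a", "x")], 2)

def Spec_hash_partition_join (left : List (String × Int)) (right : List (String × String)) (num_partitions : Int) (out : List (String × Int × String)) : Prop := out = hash_partition_join_alt left right num_partitions
instance (left : List (String × Int)) (right : List (String × String)) (num_partitions : Int) (out : List (String × Int × String)) : Decidable (Spec_hash_partition_join left right num_partitions out) := by unfold Spec_hash_partition_join; infer_instance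

-- ===== CLAIM (what is proved, stated in full; the proofs are below) =====
def Claim_equal_hash_partition_join : Prop := ∀ (left : List (String × Int)) (right : List (String × String)) (num_partitions : Int), Dom_hash_partition_join left right num_partitions → Pre_hash_partition_join left right num_partitions → Spec_hash_partition_join left right num_partitions (hash_partition_join left right num_partitions)

-- ===== LEMMAS AND PROOFS =====

-- the common normal form both ports are reduced to: for each partition id in
-- order, the matching (key, value, label) rows in left-then-right order
def pvRows (left : List (String × Int)) (right : List (String × String)) (p : Int) : List (String × Int × String) :=
  (PySem.List.pyRange 0 p).flatMap (fun pid =>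
    (left.filter (fun kv => PySem.Int.mod (pvHash kv.1) p == pid)).flatMap (fun kv =>
      ((right.filter (fun kl => (PySem.Int.mod (pvHash kl.1) p, kl.1) == (pid, kv.1))).map (fun kl => kl.2)).map
        (fun lab => (kv.1, kv.2, lab))))

-- a defaultdict-append loop groups: the bucket of q is the q-fiber in input order
lemma bucket_getD {α κ β : Type} [BEq κ] [LawfulBEq κ] (f : α → κ) (g : α → β)
    (xs : List α) (d : PySem.Dict κ (List β)) (q : κ) :
    (xs.foldl (fun d x => d.modify (f x) [] (fun b => b ++ [g x])) d).getD q []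
      = d.getD q [] ++ (xs.filter (fun x => f x == q)).map g := by
  have h1 : xs.foldl (fun d x => d.modify (f x) [] (fun b => b ++ [g x])) d
      = (xs.map (fun x => (f x, g x))).foldl (fun d p => d.modify p.1 [] (fun b => b ++ [p.2])) d := by
    rw [List.foldl_map]
  rw [h1, PySem.Dict.getD_foldl_modify_append, List.filter_map, List.map_map]
  rfl

lemma pair_beq (a c : Int) (b d : String) : ((a, b) == (c, d)) = (b == d && a == c) := by
  show (a == c && b == d) = (b == d && a == c)
  exact Bool.and_comm ..

-- ---- stability of PySem.List.sorted: sorting by key = concatenating fibers ----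
lemma insertBy_cons {α : Type} (B : α → α → Bool) (x y : α) (ys : List α) :
    PySem.List.insertBy B x (y :: ys) = if B x y then x :: y :: ys else y :: PySem.List.insertBy B x ys := rfl

lemma insertBy_all_true {α : Type} (B : α → α → Bool) (x : α) (r : List α)
    (h : ∀ y ∈ r, B x y = true) : PySem.List.insertBy B x r = x :: r := by
  cases r with
  | nil => rfl
  | cons y ys => rw [insertBy_cons, if_pos (h y (List.mem_cons_self))]

lemma insertBy_append_false {α : Type} (B : α → α → Bool) (x : α) (l r : List α)
    (h : ∀ y ∈ l, B x y = false) :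
    PySem.List.insertBy B x (l ++ r) = l ++ PySem.List.insertBy B x r := by
  induction l with
  | nil => simp
  | cons y ys ih =>
      rw [List.cons_append, insertBy_cons, if_neg (by simp [h y List.mem_cons_self]),
        ih (fun z hz => h z (List.mem_cons_of_mem _ hz)), List.cons_append]

lemma flatMap_if_neq {α : Type} (kf : α → Int) (x : α) (ks : List Int) (fibs : Int → List α)
    (h : ∀ q ∈ ks, kf x ≠ q) :
    ks.flatMap (fun q => if kf x = q then fibs q ++ [x] else fibs q) = ks.flatMap fibs := by
  induction ks with
  | nil => rfl
  | cons q ks' ih =>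
      rw [List.flatMap_cons, List.flatMap_cons, if_neg (h q List.mem_cons_self),
        ih (fun z hz => h z (List.mem_cons_of_mem _ hz))]

-- stable insertion into a fiber-concatenation appends x at the END of its fiber
lemma insertBy_flatMap {α : Type} (kf : α → Int) (x : α) (ks : List Int) (fibs : Int → List α)
    (hks : ks.Pairwise (· < ·)) (hfib : ∀ q ∈ ks, ∀ y ∈ fibs q, kf y = q) (hx : kf x ∈ ks) :
    PySem.List.insertBy (fun a b => decide (kf a < kf b)) x (ks.flatMap fibs)
      = ks.flatMap (fun q => if kf x = q then fibs q ++ [x] else fibs q) := by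
  induction ks with
  | nil => cases hx
  | cons q ks' ih =>
      rw [List.flatMap_cons, List.flatMap_cons]
      have hq_lt : ∀ q' ∈ ks', q < q' := (List.pairwise_cons.mp hks).1
      by_cases hq : kf x = q
      · rw [insertBy_append_false _ _ _ _
          (fun y hy => by simp [hfib q List.mem_cons_self y hy, hq])]
        have hall : ∀ y ∈ ks'.flatMap fibs, (decide (kf x < kf y)) = true := by
          intro y hy
          obtain ⟨q', hq', hyf⟩ := List.mem_flatMap.mp hy
          have := hfib q' (List.mem_cons_of_mem _ hq') y hyf
          simp [this, hq]
          exact hq_lt q' hq'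
        rw [insertBy_all_true _ _ _ hall, if_pos hq,
          flatMap_if_neq kf x ks' fibs (fun q' hq' => by have := hq_lt q' hq'; omega)]
        simp
      · have hx' : kf x ∈ ks' := by
          rcases List.mem_cons.mp hx with h | h
          · exact absurd h hq
          · exact h
        have hgt : q < kf x := hq_lt _ hx'
        rw [insertBy_append_false _ _ _ _
          (fun y hy => by
            have := hfib q List.mem_cons_self y hy
            simp [this]; omega),
          ih (List.pairwise_cons.mp hks).2 (fun q' h' => hfib q' (List.mem_cons_of_mem _ h')) hx',
          if_neg hq]

lemma foldl_insertBy_fibers {α : Type} (kf : α → Int) (ks : List Int) (hks : ks.Pairwise (· < ·)) :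
    ∀ (xs pre : List α), (∀ x ∈ xs, kf x ∈ ks) →
    xs.foldl (fun acc x => PySem.List.insertBy (fun a b => decide (kf a < kf b)) x acc)
        (ks.flatMap (fun q => pre.filter (fun y => kf y == q)))
      = ks.flatMap (fun q => (pre ++ xs).filter (fun y => kf y == q)) := by
  intro xs
  induction xs with
  | nil => intro pre _; simp
  | cons x xs' ih =>
      intro pre hcov
      rw [List.foldl_cons,
        insertBy_flatMap kf x ks _ hks
          (fun q _ y hy => by
            have := List.of_mem_filter hy
            exact beq_iff_eq.mp this)
          (hcov x List.mem_cons_self)]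
      have hfun : (fun q => if kf x = q then (pre.filter (fun y => kf y == q)) ++ [x]
            else pre.filter (fun y => kf y == q))
          = (fun q => (pre ++ [x]).filter (fun y => kf y == q)) := by
        funext q
        rw [List.filter_append]
        by_cases h : kf x = q
        · simp [h]
        · simp [h]
      rw [hfun, ih (pre ++ [x]) (fun z hz => hcov z (List.mem_cons_of_mem _ hz))]
      simp

lemma sorted_fibers {α : Type} (kf : α → Int) (xs : List α) (ks : List Int)
    (hks : ks.Pairwise (· < ·)) (hcov : ∀ x ∈ xs, kf x ∈ ks) :
    PySem.List.sorted xs kf = ks.flatMap (fun q => xs.filter (fun y => kf y == q)) := by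
  rw [PySem.List.sorted_eq_foldl_insertBy]
  have h := foldl_insertBy_fibers kf ks hks xs [] hcov
  rw [show (List.flatMap (fun q => List.filter (fun y => kf y == q) ([] : List α)) ks) = [] by simp] at h
  simpa using h

-- ---- the two characterizations ----
lemma portA_eq (left : List (String × Int)) (right : List (String × String)) (p : Int) :
    hash_partition_join left right p = pvRows left right p := by
  unfold hash_partition_join pvRows
  simp only [PySem.List.foldl_append_singleton_eq_map, PySem.List.foldl_append_eq_flatMap,
    bucket_getD, PySem.Dict.getD_empty, List.nil_append, pair_beq]
  simp only [List.map_id', List.filter_filter]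

lemma portB_eq_pos (left : List (String × Int)) (right : List (String × String)) (p : Int) (hp : 0 < p) :
    hash_partition_join_alt left right p = pvRows left right p := by
  simp only [hash_partition_join_alt, pvRows]
  have hs := sorted_fibers (fun t => t.1)
    (left.map (fun kv => (PySem.Int.mod (pvHash kv.1) p, kv.1, kv.2)))
    (PySem.List.pyRange 0 p)
    (PySem.List.pairwise_lt_pyRange_one 0 p)
    (by
      intro t ht
      obtain ⟨kv, _, rfl⟩ := List.mem_map.mp ht
      exact PySem.List.mem_pyRange_one.mpr ⟨PySem.Int.mod_nonneg _ hp, PySem.Int.mod_lt _ hp⟩)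
  rw [hs, List.flatMap_assoc]
  refine List.flatMap_congr ?_
  intro pid _
  rw [List.filter_map, List.flatMap_map]
  refine List.flatMap_congr ?_
  intro kv hkv
  have hpid : PySem.Int.mod (pvHash kv.1) p = pid := by
    have := List.of_mem_filter hkv
    simpa using this
  rw [bucket_getD (fun kl => (PySem.Int.mod (pvHash kl.1) p, kl.1)) (fun kl => kl.2) right PySem.Dict.empty]
  simp [hpid, List.map_map]

-- ===== VERDICT (by name: the statement is the Claim_ definition above) =====
theorem hash_partition_join_spec : Claim_equal_hash_partition_join := by
  intro left right p _ hp
  unfold Spec_hash_partition_join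
  rw [portA_eq, portB_eq_pos _ _ _ (by exact lt_of_lt_of_le one_pos hp)]
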